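-- pv_equiv track=rewrite | github.com/865699871/IAGS_version1.0 | util/calculateFissionsAndFusions.py | build_adj
-- ===== SOURCE A (Python) =====
-- def build_adj(sequence):
--     adjlist = []
--     for i in sequence:
--         start = '$'
--         for j in i:
--             if j.startswith('-'):
--                 last = j[1:]+'b'
--                 adj = sorted([start,last])
--                 adjlist.append(adj[0]+'@'+adj[1])
--                 start = j[1:] + 'a'
--             else:
--                 last = j + 'a'
--                 adj = sorted([start, last])
--                 adjlist.append(adj[0]+'@'+adj[1])
--                 start = j + 'b'
--         adj = sorted([start,'$'])
--         adjlist.append(adj[0]+'@'+adj[1])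
--     return adjlist
-- ===== SOURCE B (Python) =====
-- def build_adj(sequence):
--     out = []
--     for chrom in sequence:
--         nodes = ['$']
--         for g in chrom:
--             if g.startswith('-'):
--                 nodes += [g[1:] + 'b', g[1:] + 'a']
--             else:
--                 nodes += [g + 'a', g + 'b']
--         nodes.append('$')
--         it = iter(nodes)
--         for x, y in zip(it, it):
--             lo, hi = sorted((x, y))
--             out.append(lo + '@' + hi)
--     return out
-- ===== Notes on version B (the rewrite author's own statement) =====
-- stated objective: alternative
-- what changed: Replaces A's carried 'start' state threaded through the gene loop by a two-phase decomposition per chromosome: first build the flat endpoint-node list ['$', head1, tail1, ..., '$'], then pair it into non-overlapping consecutive pairs and format each pair.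
import Mathlib
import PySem

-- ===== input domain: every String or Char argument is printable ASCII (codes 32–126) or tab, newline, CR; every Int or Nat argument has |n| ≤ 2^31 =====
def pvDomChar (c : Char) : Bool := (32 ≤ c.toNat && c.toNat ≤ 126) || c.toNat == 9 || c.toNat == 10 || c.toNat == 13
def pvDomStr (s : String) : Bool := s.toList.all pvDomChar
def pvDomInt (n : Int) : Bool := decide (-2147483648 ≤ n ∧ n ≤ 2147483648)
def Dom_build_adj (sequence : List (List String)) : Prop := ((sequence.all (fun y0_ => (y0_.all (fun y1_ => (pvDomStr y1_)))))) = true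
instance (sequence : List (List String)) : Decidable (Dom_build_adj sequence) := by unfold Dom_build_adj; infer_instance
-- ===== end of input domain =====

-- B decomposes each chromosome into a flat endpoint-node list paired in strides of 2
-- instead of A's threaded 'start' state; alternative decomposition, same cost.

-- shared formatting of one adjacency: sorted pair joined with '@'
def pairStr (x y : String) : String :=
  let adj := PySem.List.sorted [x, y] (fun s => s) false
  PySem.List.pyGetD adj 0 "" ++ "@" ++ PySem.List.pyGetD adj 1 ""

-- ===== PORT A =====
def build_adj (sequence : List (List String)) : List String :=
  sequence.foldl (fun adjlist i =>
    let st := i.foldl (fun (p : List String × String) j =>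
      if PySem.Str.startswith j "-" then
        let last := PySem.Str.slice j (some 1) none ++ "b"
        (p.1 ++ [pairStr p.2 last], PySem.Str.slice j (some 1) none ++ "a")
      else
        let last := j ++ "a"
        (p.1 ++ [pairStr p.2 last], j ++ "b")) (adjlist, "$")
    st.1 ++ [pairStr st.2 "$"]) []

-- ===== PORT B =====
-- endpoint nodes of one chromosome: '$', then head/tail per gene, then '$'
def nodesOf (i : List String) : List String :=
  "$" :: (i.flatMap (fun g =>
    if PySem.Str.startswith g "-" then
      [PySem.Str.slice g (some 1) none ++ "b", PySem.Str.slice g (some 1) none ++ "a"]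
    else
      [g ++ "a", g ++ "b"]) ++ ["$"])

-- zip(it, it): consecutive non-overlapping pairs
def pairUp : List String → List (String × String)
  | x :: y :: rest => (x, y) :: pairUp rest
  | _ => []

def build_adj_alt (sequence : List (List String)) : List String :=
  sequence.flatMap (fun i => (pairUp (nodesOf i)).map (fun p => pairStr p.1 p.2))

-- ===== PRECONDITION & SPEC =====
def Spec_build_adj (sequence : List (List String)) (out : List String) : Prop := out = build_adj_alt sequence
instance (sequence : List (List String)) (out : List String) : Decidable (Spec_build_adj sequence out) := by unfold Spec_build_adj; infer_instance

-- ===== CLAIM (what is proved, stated in full; the proofs are below) =====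
def Claim_equal_build_adj : Prop := ∀ (sequence : List (List String)), Dom_build_adj sequence → Spec_build_adj sequence (build_adj sequence)

-- ===== LEMMAS AND PROOFS =====

-- per-chromosome invariant: A's inner fold from (acc, start), closed off with the final '$'
-- adjacency, equals acc ++ B's pairing of (start :: flat endpoint list ++ ['$']).
theorem chrom_inv (i : List String) (acc : List String) (start : String) :
    (let st := i.foldl (fun (p : List String × String) j =>
      if PySem.Str.startswith j "-" then
        let last := PySem.Str.slice j (some 1) none ++ "b"
        (p.1 ++ [pairStr p.2 last], PySem.Str.slice j (some 1) none ++ "a")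
      else
        let last := j ++ "a"
        (p.1 ++ [pairStr p.2 last], j ++ "b")) (acc, start)
     st.1 ++ [pairStr st.2 "$"])
    = acc ++ (pairUp (start :: (i.flatMap (fun g =>
        if PySem.Str.startswith g "-" then
          [PySem.Str.slice g (some 1) none ++ "b", PySem.Str.slice g (some 1) none ++ "a"]
        else
          [g ++ "a", g ++ "b"]) ++ ["$"]))).map (fun p => pairStr p.1 p.2) := by
  induction i generalizing acc start with
  | nil => simp [pairUp]
  | cons j rest ih =>
    by_cases h : PySem.Str.startswith j "-"
    · simp only [List.foldl_cons, List.flatMap_cons, h]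
      rw [ih]
      simp [pairUp]
    · simp only [List.foldl_cons, List.flatMap_cons, h]
      rw [ih]
      simp [pairUp]

-- A's outer fold with accumulator is acc ++ B's flatMap
theorem outer_inv (seq : List (List String)) (acc : List String) :
    seq.foldl (fun adjlist i =>
      let st := i.foldl (fun (p : List String × String) j =>
        if PySem.Str.startswith j "-" then
          let last := PySem.Str.slice j (some 1) none ++ "b"
          (p.1 ++ [pairStr p.2 last], PySem.Str.slice j (some 1) none ++ "a")
        else
          let last := j ++ "a"
          (p.1 ++ [pairStr p.2 last], j ++ "b")) (adjlist, "$")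
      st.1 ++ [pairStr st.2 "$"]) acc
    = acc ++ seq.flatMap (fun i => (pairUp (nodesOf i)).map (fun p => pairStr p.1 p.2)) := by
  induction seq generalizing acc with
  | nil => simp
  | cons i rest ih =>
    simp only [List.foldl_cons, List.flatMap_cons]
    rw [chrom_inv, ih, nodesOf, List.append_assoc]

-- ===== VERDICT (by name: the statement is the Claim_ definition above) =====
theorem build_adj_spec : Claim_equal_build_adj := by
  intro sequence _
  show build_adj sequence = build_adj_alt sequence
  rw [build_adj, build_adj_alt, outer_inv]
  simp
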